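-- pv_equiv track=rewrite | github.com/ts207/solo | project/research/knowledge/knobs.py | _default_agent_level
-- ===== SOURCE A (Python) =====
-- def _default_agent_level(group: str, name: str) -> str:
--     token = f"{group}.{name}"
--     if group in {"campaign_memory", "campaign_memory_stage", "promotion", "search_limits"}:
--         return "core"
--     if group in {"promotion_profile_defaults", "promotion_policy_resolution"}:
--         return "advanced"
--     if group == "promotion_timeframe_consensus":
--         return "internal"
--     if any(
--         key in token
--         for key in ("retail_profiles", "objective", "phase2_gates", "shrinkage_parameters")
--     ):
--         return "advanced"
--     return "advanced"
-- ===== SOURCE B (Python) =====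
-- # Recursive first-match rule interpreter over a tiny rules table; every group not
-- # matched by a rule is "advanced" (A's dead token/any() branch returns the fallback anyway).
-- _RULES = [
--     (("campaign_memory", "campaign_memory_stage", "promotion", "search_limits"), "core"),
--     (("promotion_timeframe_consensus",), "internal"),
-- ]
--
-- def _classify(group, rules):
--     if not rules:
--         return "advanced"
--     groups, level = rules[0]
--     if group in groups:
--         return level
--     return _classify(group, rules[1:])
--
-- def _default_agent_level(group: str, name: str) -> str:
--     return _classify(group, _RULES)
-- ===== Notes on version B (the rewrite author's own statement) =====
-- stated objective: alternative
-- what changed: Replaced the straight-line if-chain (with its unused token f-string and dead any()-substring scan whose branch returns the same 'advanced' as the fallback) by a recursive first-match interpreter over a declarative rules table, with 'advanced' as the base-case default.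
import Mathlib
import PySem

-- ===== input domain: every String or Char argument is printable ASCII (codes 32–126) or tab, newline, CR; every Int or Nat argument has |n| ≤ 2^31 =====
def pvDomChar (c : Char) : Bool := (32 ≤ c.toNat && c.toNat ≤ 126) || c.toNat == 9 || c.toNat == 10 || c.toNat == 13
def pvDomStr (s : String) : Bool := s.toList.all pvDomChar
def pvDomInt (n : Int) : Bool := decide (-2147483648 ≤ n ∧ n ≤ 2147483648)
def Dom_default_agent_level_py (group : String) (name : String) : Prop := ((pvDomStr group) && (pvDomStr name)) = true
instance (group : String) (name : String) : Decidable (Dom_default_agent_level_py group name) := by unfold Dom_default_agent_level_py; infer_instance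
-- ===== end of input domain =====

-- ===== PORT A =====
-- B replaces A's if-chain (with dead token/any() code) by a recursive first-match rules table; objective: alternative.
def default_agent_level_py (group : String) (name : String) : String :=
  let token := group ++ "." ++ name
  if group = "campaign_memory" ∨ group = "campaign_memory_stage" ∨ group = "promotion" ∨ group = "search_limits" then "core"
  else if group = "promotion_profile_defaults" ∨ group = "promotion_policy_resolution" then "advanced"
  else if group = "promotion_timeframe_consensus" then "internal"
  else if ["retail_profiles", "objective", "phase2_gates", "shrinkage_parameters"].any
      (fun key => PySem.Str.isIn key token) then "advanced"
  else "advanced"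

-- ===== PORT B =====
def pvRules : List (List String × String) :=
  [(["campaign_memory", "campaign_memory_stage", "promotion", "search_limits"], "core"),
   (["promotion_timeframe_consensus"], "internal")]

def pvClassify (group : String) : List (List String × String) → String
  | [] => "advanced"
  | (groups, level) :: rest =>
      if groups.contains group then level else pvClassify group rest

def default_agent_level_py_alt (group : String) (_name : String) : String :=
  pvClassify group pvRules

-- ===== PRECONDITION & SPEC =====
def Spec_default_agent_level_py (group : String) (name : String) (out : String) : Prop := out = default_agent_level_py_alt group name
instance (group : String) (name : String) (out : String) : Decidable (Spec_default_agent_level_py group name out) := by unfold Spec_default_agent_level_py; infer_instance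

-- ===== CLAIM (what is proved, stated in full; the proofs are below) =====
def Claim_equal_default_agent_level_py : Prop := ∀ (group : String) (name : String), Dom_default_agent_level_py group name → Spec_default_agent_level_py group name (default_agent_level_py group name)

-- ===== LEMMAS AND PROOFS =====

-- ===== VERDICT (by name: the statement is the Claim_ definition above) =====
theorem default_agent_level_py_spec : Claim_equal_default_agent_level_py := by
  intro group name _
  unfold Spec_default_agent_level_py default_agent_level_py default_agent_level_py_alt pvRules
  simp only [pvClassify, List.contains_eq_mem, List.mem_cons,
    List.not_mem_nil, or_false, decide_eq_true_eq]
  split_ifs <;> simp_all
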